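-- pv_equiv track=rewrite | github.com/Tropinene/advent_of_code | 2019/day4: Secure Container/day4.py | has_adjacent_pairs
-- ===== SOURCE A (Python) =====
-- def has_adjacent_pairs(num):
--     num_str = str(num)
--     count = 1
--     has_valid_pair = False
--
--     for i in range(len(num_str) - 1):
--         if num_str[i] == num_str[i + 1]:
--             count += 1
--         else:
--             if count == 2:
--                 has_valid_pair = True
--             count = 1
--     # Check the last pair
--     if count == 2:
--         has_valid_pair = True
--
--     return has_valid_pair
-- ===== SOURCE B (Python) =====
-- def has_adjacent_pairs(num):
--     # An exact-length-2 run exists iff some position has s[i-1] != s[i] == s[i+1] != s[i+2],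
--     # with a NUL sentinel (never in str(num)) padding both ends.
--     t = '\0' + str(num) + '\0'
--     return any(a != b == c != d for a, b, c, d in zip(t, t[1:], t[2:], t[3:]))
-- ===== Notes on version B (the rewrite author's own statement) =====
-- stated objective: alternative
-- what changed: Replaces A's stateful running counter (with its separate post-loop last-pair check) by a stateless windowed test: pad str(num) with a sentinel and check whether some window of four consecutive characters matches the pattern a != b == c != d, via zip of four shifted views.
import Mathlib
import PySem

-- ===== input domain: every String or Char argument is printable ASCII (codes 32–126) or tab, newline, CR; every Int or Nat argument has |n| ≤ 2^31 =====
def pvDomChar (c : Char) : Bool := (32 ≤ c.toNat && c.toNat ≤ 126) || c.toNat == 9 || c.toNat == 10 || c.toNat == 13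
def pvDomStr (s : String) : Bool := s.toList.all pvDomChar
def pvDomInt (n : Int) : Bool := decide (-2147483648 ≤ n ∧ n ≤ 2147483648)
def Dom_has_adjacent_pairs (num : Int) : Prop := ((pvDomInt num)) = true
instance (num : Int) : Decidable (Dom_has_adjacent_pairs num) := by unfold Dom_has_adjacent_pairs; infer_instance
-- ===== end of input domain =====

-- B replaces A's running counter + post-loop last-pair check by a stateless windowed
-- test: pad str(num) with a sentinel and look for the pattern a != b == c != d in the
-- four shifted zipped views (alternative, same cost).


-- ===== PORT A =====
-- literal port of A: fold over range(len(num_str)-1) with state (count, has_valid_pair),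
-- then the post-loop 'check the last pair'
def has_adjacent_pairs (num : Int) : Bool :=
  let s := PySem.Int.toChars num
  let st := (PySem.List.pyRange 0 ((s.length : Int) - 1) 1).foldl
    (fun (st : Int × Bool) i =>
      if PySem.List.pyGetD s i ' ' = PySem.List.pyGetD s (i + 1) ' '
      then (st.1 + 1, st.2)
      else (1, st.2 || decide (st.1 = 2)))
    (1, false)
  st.2 || decide (st.1 = 2)

-- ===== PORT B =====
-- Source B: t = '\0' + str(num) + '\0'; any(a != b == c != d for a,b,c,d in zip(t, t[1:], t[2:], t[3:]))
def has_adjacent_pairs_alt (num : Int) : Bool :=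
  let t := '\x00' :: (PySem.Int.toChars num ++ ['\x00'])
  (((t.zip (PySem.List.slice t (some 1) none)).zip
      (PySem.List.slice t (some 2) none)).zip
      (PySem.List.slice t (some 3) none)).any
    (fun x => decide (x.1.1.1 ≠ x.1.1.2) && (x.1.1.2 == x.1.2) && decide (x.1.2 ≠ x.2))

-- ===== PRECONDITION & SPEC =====
def Spec_has_adjacent_pairs (num : Int) (out : Bool) : Prop := out = has_adjacent_pairs_alt num
instance (num : Int) (out : Bool) : Decidable (Spec_has_adjacent_pairs num out) := by unfold Spec_has_adjacent_pairs; infer_instance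

-- ===== CLAIM (what is proved, stated in full; the proofs are below) =====
def Claim_equal_has_adjacent_pairs : Prop := ∀ (num : Int), Dom_has_adjacent_pairs num → Spec_has_adjacent_pairs num (has_adjacent_pairs num)

-- ===== LEMMAS AND PROOFS =====

-- the common yardstick both sides are reduced to: the maximal run lengths of the string
def pvRuns (s : List Char) : List Nat :=
  match s with
  | [] => []
  | c :: rest =>
      (1 + (rest.takeWhile (fun x => x == c)).length)
        :: pvRuns (rest.dropWhile (fun x => x == c))
termination_by s.length
decreasing_by
  simp only [List.length_cons]
  exact Nat.lt_succ_of_le (List.length_dropWhile_le _ _)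

-- ---------- A-side: A's fold equals '2 is a run length' ----------

-- A's loop rewritten as a structural recursion over adjacent character pairs
def pvLoopA : List Char → Int × Bool → Int × Bool
  | [], st => st
  | [_], st => st
  | a :: b :: t, st =>
      pvLoopA (b :: t)
        (if a = b then (st.1 + 1, st.2) else (1, st.2 || decide (st.1 = 2)))

-- A's index fold over range(len-1) equals the pair recursion
lemma pvFold_eq_loopA (s : List Char) (st : Int × Bool) :
    (List.range (s.length - 1)).foldl
      (fun (st : Int × Bool) (i : Nat) =>
        if s.getD i ' ' = s.getD (i + 1) ' '
        then (st.1 + 1, st.2)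
        else (1, st.2 || decide (st.1 = 2))) st = pvLoopA s st := by
  induction s generalizing st with
  | nil => simp [pvLoopA]
  | cons a rest ih =>
    cases rest with
    | nil => simp [pvLoopA]
    | cons b t =>
      have h : (a :: b :: t).length - 1 = t.length + 1 := by simp
      rw [h, List.range_succ_eq_map, List.foldl_cons, List.foldl_map]
      have h2 : (b :: t).length - 1 = t.length := by simp
      simpa [pvLoopA] using ih (st := if a = b then (st.1 + 1, st.2)
        else (1, st.2 || decide (st.1 = 2)))

-- the key invariant: entering the loop inside a run of length k+1 of the head character
lemma pvLoopA_runs (s : List Char) :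
    ∀ (c : Char) (k : Nat) (flag : Bool),
    (let st := pvLoopA (c :: s) ((k : Nat) + 1, flag)
     st.2 || decide (st.1 = 2)) =
      (flag || ((k + 1 + (s.takeWhile (fun x => x == c)).length)
        :: pvRuns (s.dropWhile (fun x => x == c))).contains 2) := by
  induction s with
  | nil =>
    intro c k flag
    have h0 : pvRuns ([] : List Char) = [] := by rw [pvRuns]
    simp only [pvLoopA, List.takeWhile_nil, List.dropWhile_nil, h0, List.length_nil,
      Nat.add_zero]
    cases flag
    · rw [Bool.eq_iff_iff]; simp; omega
    · rw [Bool.eq_iff_iff]; simp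
  | cons b t ih =>
    intro c k flag
    by_cases hbc : b = c
    · subst hbc
      simp only [pvLoopA, if_true]
      rw [show ((k : Int) + 1 + 1) = (((k + 1 : Nat) : Int) + 1) from by push_cast; ring]
      rw [ih b (k + 1) flag]
      simp only [List.takeWhile_cons, List.dropWhile_cons, beq_self_eq_true, if_true,
        List.length_cons]
      rw [show (k + 1) + 1 + (t.takeWhile (fun x => x == b)).length
            = k + 1 + ((t.takeWhile (fun x => x == b)).length + 1) from by omega]
    · have hcb : ¬ c = b := fun h => hbc h.symm
      have hbeq : (b == c) = false := by simp [hbc]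
      simp only [pvLoopA]
      rw [if_neg hcb]
      rw [show ((1 : Int), flag || decide ((k : Int) + 1 = 2))
            = (((0 : Nat) : Int) + 1, flag || decide ((k : Int) + 1 = 2)) from by norm_num]
      rw [ih b 0 (flag || decide ((k : Int) + 1 = 2))]
      simp only [List.takeWhile_cons, List.dropWhile_cons, hbeq, if_false, Bool.false_eq_true,
        List.length_nil, Nat.zero_add, Nat.add_zero]
      rw [show pvRuns (b :: t) = (1 + (t.takeWhile (fun x => x == b)).length)
            :: pvRuns (t.dropWhile (fun x => x == b)) from by rw [pvRuns]]
      have hx : decide ((k : Int) + 1 = 2) = (2 == k + 1) := by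
        rw [Bool.eq_iff_iff]; simp; omega
      rw [hx]
      simp only [List.contains_cons]
      cases flag <;> simp

-- full characterisation of A's value on an arbitrary character list
lemma pvA_eq_runs (s : List Char) :
    (let st := (PySem.List.pyRange 0 ((s.length : Int) - 1) 1).foldl
      (fun (st : Int × Bool) i =>
        if PySem.List.pyGetD s i ' ' = PySem.List.pyGetD s (i + 1) ' '
        then (st.1 + 1, st.2)
        else (1, st.2 || decide (st.1 = 2)))
      (1, false)
     st.2 || decide (st.1 = 2)) = (pvRuns s).contains 2 := by
  cases s with
  | nil =>
    have h0 : pvRuns ([] : List Char) = [] := by rw [pvRuns]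
    simp [h0, PySem.List.pyRange]
  | cons c rest =>
    have hlen : (((c :: rest).length : Int)) - 1 = ((rest.length : Nat) : Int) := by
      simp
    rw [hlen, PySem.List.pyRange_zero_natCast, List.foldl_map]
    have hg : (fun (st : Int × Bool) (i : Nat) =>
        (if PySem.List.pyGetD (c :: rest) (i : Int) ' '
            = PySem.List.pyGetD (c :: rest) ((i : Int) + 1) ' '
         then (st.1 + 1, st.2)
         else (1, st.2 || decide (st.1 = 2))))
        = (fun (st : Int × Bool) (i : Nat) =>
           if (c :: rest).getD i ' ' = (c :: rest).getD (i + 1) ' '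
           then (st.1 + 1, st.2)
           else (1, st.2 || decide (st.1 = 2))) := by
      funext st i
      rw [show ((i : Int) + 1) = ((i + 1 : Nat) : Int) from by push_cast; ring,
        PySem.List.pyGetD_natCast, PySem.List.pyGetD_natCast]
    rw [hg]
    have hr : rest.length = (c :: rest).length - 1 := by simp
    rw [hr, pvFold_eq_loopA]
    have h1 : ((1 : Int), false) = (((0 : Nat) : Int) + 1, false) := by norm_num
    rw [h1, pvLoopA_runs rest c 0 false]
    rw [show pvRuns (c :: rest) = (1 + (rest.takeWhile (fun x => x == c)).length)
          :: pvRuns (rest.dropWhile (fun x => x == c)) from by rw [pvRuns]]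
    simp

-- ---------- B-side: the zipped window test equals '2 is a run length' ----------

-- the window scan Source B's zip/any performs, as a recursion on the padded string
def pvW : List Char → Bool
  | a :: b :: c :: d :: t =>
      (decide (a ≠ b) && (b == c) && decide (c ≠ d)) || pvW (b :: c :: d :: t)
  | _ => false

-- Source B's any-over-zip-of-shifts IS the window scan
lemma pvZip_eq_W (t : List Char) :
    ((((t.zip (t.drop 1)).zip (t.drop 2)).zip (t.drop 3)).any
      (fun x => decide (x.1.1.1 ≠ x.1.1.2) && (x.1.1.2 == x.1.2) && decide (x.1.2 ≠ x.2)))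
      = pvW t := by
  induction t with
  | nil => simp [pvW]
  | cons a t iha =>
    cases t with
    | nil => simp [pvW]
    | cons b t =>
      cases t with
      | nil => simp [pvW]
      | cons c t =>
        cases t with
        | nil => simp [pvW]
        | cons d r =>
          simp only [List.drop_succ_cons, List.drop_zero, List.zip_cons_cons, List.any_cons] at iha ⊢
          rw [iha]
          simp [pvW]

-- a window never fires inside a run: drop the first of two equal characters
lemma pvW_skip (a : Char) (t : List Char) :
    pvW (a :: a :: t) = pvW (a :: t) := by
  match t with
  | [] => rfl
  | [c] => rfl
  | c :: d :: r => simp [pvW]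

-- collapse a whole run behind the leading character
lemma pvW_dropRun (c : Char) (v X : List Char) :
    pvW (c :: c :: (v ++ X)) = pvW (c :: (v.dropWhile (fun x => x == c) ++ X)) := by
  induction v with
  | nil => simpa using pvW_skip c X
  | cons b w ih =>
    by_cases hbc : b = c
    · calc pvW (c :: c :: ((b :: w) ++ X))
          = pvW (c :: c :: (w ++ X)) := by
            rw [hbc, List.cons_append]; exact pvW_skip c (c :: (w ++ X))
        _ = pvW (c :: (w.dropWhile (fun x => x == c) ++ X)) := ih
        _ = pvW (c :: ((b :: w).dropWhile (fun x => x == c) ++ X)) := by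
            simp [hbc]
    · have hb : (b == c) = false := by simp [hbc]
      rw [List.cons_append, pvW_skip]
      simp [hb]

-- main invariant: after a boundary prev ≠ c, the scan sees exactly the runs of c :: t
lemma pvW_main : ∀ (n : Nat) (t : List Char), t.length ≤ n → ∀ (prev c : Char),
    prev ≠ c → '\x00' ∉ (c :: t) →
    pvW (prev :: c :: (t ++ ['\x00'])) =
      ((1 + (t.takeWhile (fun x => x == c)).length)
        :: pvRuns (t.dropWhile (fun x => x == c))).contains 2 := by
  intro n
  induction n with
  | zero =>
    intro t ht prev c hpc _
    have h0 : t = [] := List.eq_nil_of_length_eq_zero (Nat.le_zero.mp ht)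
    subst h0
    have hr : pvRuns ([] : List Char) = [] := by rw [pvRuns]
    simp [pvW, hr]
  | succ n ih =>
    intro t ht prev c hpc hnul
    have hc0 : c ≠ '\x00' := fun h => hnul (by simp [h])
    cases t with
    | nil =>
      have hr : pvRuns ([] : List Char) = [] := by rw [pvRuns]
      simp [pvW, hr]
    | cons b u =>
      by_cases hbc : b = c
      · -- the run at the front has length ≥ 2
        subst hbc
        cases u with
        | nil =>
          -- run of exactly 2, then end of string: the window at the front fires
          have hr : pvRuns ([] : List Char) = [] := by rw [pvRuns]
          have hW : pvW (prev :: b :: ([b] ++ ['\x00'])) = true := by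
            simp [pvW, hpc, hc0]
          rw [hW]
          simp [hr]
        | cons e w =>
          by_cases hec : e = b
          · -- run of length ≥ 3: the front window fails, collapse the whole run
            subst hec
            have h1 : pvW (prev :: e :: ((e :: e :: w) ++ ['\x00']))
                = pvW (e :: e :: (e :: (w ++ ['\x00']))) := by
              simp [pvW]
            rw [h1, pvW_skip, pvW_dropRun]
            have hLrhs : ((e :: e :: w).takeWhile (fun x => x == e)).length
                = 2 + (w.takeWhile (fun x => x == e)).length := by
              simp; omega
            have hRdw : (e :: e :: w).dropWhile (fun x => x == e)
                = w.dropWhile (fun x => x == e) := by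
              simp
            rw [hLrhs, hRdw]
            have hhead : (2 == 1 + (2 + (w.takeWhile (fun x => x == e)).length)) = false := by
              simp; omega
            rw [List.contains_cons, hhead, Bool.false_or]
            -- now look at what follows the run
            match hr : w.dropWhile (fun x => x == e) with
            | [] =>
              have h0 : pvRuns ([] : List Char) = [] := by rw [pvRuns]
              have : pvW (e :: ([] ++ ['\x00'])) = false := rfl
              rw [this, h0]
              rfl
            | d :: ww =>
              have hde : (d == e) = false := by
                have h := List.head?_dropWhile_not (fun x => x == e) w
                rw [hr] at h; simpa using h
              have hdne : e ≠ d := fun h => by simp [← h] at hde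
              have hnw : '\x00' ∉ w := fun h => hnul (by simp [h])
              have hnul2 : '\x00' ∉ (d :: ww) := by
                intro h
                exact hnw ((List.dropWhile_sublist (fun x => x == e)).mem (hr ▸ h))
              have hlen : ww.length ≤ n := by
                have h1 : (d :: ww).length ≤ w.length := by
                  rw [← hr]; exact List.length_dropWhile_le _ _
                simp only [List.length_cons] at h1 ht
                omega
              rw [show (d :: ww) ++ ['\x00'] = (d :: (ww ++ ['\x00'])) from rfl,
                ih ww hlen e d hdne hnul2]
              rw [show pvRuns (d :: ww) = (1 + (ww.takeWhile (fun x => x == d)).length)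
                    :: pvRuns (ww.dropWhile (fun x => x == d)) from by rw [pvRuns]]
          · -- run of exactly 2 followed by a different character: the front window fires
            have hee : (e == b) = false := by simp [hec]
            have hbe : b ≠ e := fun h => hec h.symm
            have hW : pvW (prev :: b :: ((b :: e :: w) ++ ['\x00'])) = true := by
              simp [pvW, hpc, hbe]
            rw [hW]
            simp [hee]
      · -- boundary at once: the run of c has length 1, never a valid pair here
        have hbb : (b == c) = false := by simp [hbc]
        have hcb : c ≠ b := fun h => hbc h.symm
        have hnul2 : '\x00' ∉ (b :: u) := fun h => hnul (by simp at h ⊢; tauto)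
        have hlen : u.length ≤ n := by simp at ht; omega
        have hcbb : (c == b) = false := by simp [hcb]
        have hfirst : pvW (prev :: c :: ((b :: u) ++ ['\x00']))
            = pvW (c :: b :: (u ++ ['\x00'])) := by
          obtain ⟨d, X, hX⟩ : ∃ d X, u ++ ['\x00'] = d :: X := by
            cases u <;> exact ⟨_, _, rfl⟩
          rw [List.cons_append, hX]
          simp [pvW, hcbb]
        rw [hfirst, ih u hlen c b hcb hnul2]
        simp only [List.takeWhile_cons, List.dropWhile_cons, hbb, if_false,
          Bool.false_eq_true, List.length_nil, Nat.add_zero]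
        rw [show pvRuns (b :: u) = (1 + (u.takeWhile (fun x => x == b)).length)
              :: pvRuns (u.dropWhile (fun x => x == b)) from by rw [pvRuns]]
        simp

-- padded window scan on a NUL-free string = '2 is a run length'
lemma pvW_pad (s : List Char) (h : '\x00' ∉ s) :
    pvW ('\x00' :: (s ++ ['\x00'])) = (pvRuns s).contains 2 := by
  match s, h with
  | [], _ =>
    have h0 : pvRuns ([] : List Char) = [] := by rw [pvRuns]
    simp [pvW, h0]
  | c :: rest, h =>
    have hc : ('\x00' : Char) ≠ c := fun he => h (by simp [← he])
    rw [show ('\x00' :: ((c :: rest) ++ ['\x00'])) = ('\x00' :: c :: (rest ++ ['\x00']))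
          from by simp]
    rw [pvW_main rest.length rest le_rfl '\x00' c hc h]
    rw [show pvRuns (c :: rest) = (1 + (rest.takeWhile (fun x => x == c)).length)
          :: pvRuns (rest.dropWhile (fun x => x == c)) from by rw [pvRuns]]

-- str(num) never contains NUL
lemma pvDigitChar_ne_nul (k : Nat) : Nat.digitChar k ≠ '\x00' := by
  by_cases h16 : k < 16
  · interval_cases k <;> decide
  · unfold Nat.digitChar
    rw [if_neg (by omega), if_neg (by omega), if_neg (by omega), if_neg (by omega),
      if_neg (by omega), if_neg (by omega), if_neg (by omega), if_neg (by omega),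
      if_neg (by omega), if_neg (by omega), if_neg (by omega), if_neg (by omega),
      if_neg (by omega), if_neg (by omega), if_neg (by omega), if_neg (by omega)]
    decide

lemma pvToDigitsCore_mem (b : Nat) : ∀ (f n : Nat) (acc : List Char) (c : Char),
    c ∈ Nat.toDigitsCore b f n acc → c ∈ acc ∨ ∃ k, c = Nat.digitChar k := by
  intro f
  induction f with
  | zero => intro n acc c h; exact Or.inl h
  | succ f ih =>
    intro n acc c h
    rw [Nat.toDigitsCore] at h
    split at h
    · rcases List.mem_cons.mp h with h | h
      · exact Or.inr ⟨n % b, h⟩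
      · exact Or.inl h
    · rcases ih _ _ _ h with h | h
      · rcases List.mem_cons.mp h with h | h
        · exact Or.inr ⟨n % b, h⟩
        · exact Or.inl h
      · exact Or.inr h

lemma pvToChars_no_nul (num : Int) : '\x00' ∉ PySem.Int.toChars num := by
  intro h
  unfold PySem.Int.toChars at h
  split at h
  · rcases List.mem_cons.mp h with h | h
    · exact absurd h (by decide)
    · rcases pvToDigitsCore_mem 10 _ _ _ _ h with h | ⟨k, hk⟩
      · simp at h
      · exact pvDigitChar_ne_nul k hk.symm
  · rcases pvToDigitsCore_mem 10 _ _ _ _ h with h | ⟨k, hk⟩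
    · simp at h
    · exact pvDigitChar_ne_nul k hk.symm

-- ===== VERDICT (by name: the statement is the Claim_ definition above) =====
theorem has_adjacent_pairs_spec : Claim_equal_has_adjacent_pairs := by
  intro num _
  unfold Spec_has_adjacent_pairs
  have hA : has_adjacent_pairs num = (pvRuns (PySem.Int.toChars num)).contains 2 :=
    pvA_eq_runs (PySem.Int.toChars num)
  have hB : has_adjacent_pairs_alt num
      = pvW ('\x00' :: (PySem.Int.toChars num ++ ['\x00'])) := by
    have e1 : (1 : Int) = ((1 : Nat) : Int) := by norm_num
    have e2 : (2 : Int) = ((2 : Nat) : Int) := by norm_num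
    have e3 : (3 : Int) = ((3 : Nat) : Int) := by norm_num
    have hz : has_adjacent_pairs_alt num
        = (let t := '\x00' :: (PySem.Int.toChars num ++ ['\x00'])
           (((t.zip (PySem.List.slice t (some 1) none)).zip
              (PySem.List.slice t (some 2) none)).zip
              (PySem.List.slice t (some 3) none)).any
            (fun x => decide (x.1.1.1 ≠ x.1.1.2) && (x.1.1.2 == x.1.2)
              && decide (x.1.2 ≠ x.2))) := rfl
    rw [hz]
    show ((((('\x00' :: (PySem.Int.toChars num ++ ['\x00'])).zip
        (PySem.List.slice ('\x00' :: (PySem.Int.toChars num ++ ['\x00'])) (some 1) none)).zip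
        (PySem.List.slice ('\x00' :: (PySem.Int.toChars num ++ ['\x00'])) (some 2) none)).zip
        (PySem.List.slice ('\x00' :: (PySem.Int.toChars num ++ ['\x00'])) (some 3) none)).any
        (fun x => decide (x.1.1.1 ≠ x.1.1.2) && (x.1.1.2 == x.1.2) && decide (x.1.2 ≠ x.2)))
        = pvW ('\x00' :: (PySem.Int.toChars num ++ ['\x00']))
    rw [e1, e2, e3, PySem.List.slice_from_natCast, PySem.List.slice_from_natCast,
      PySem.List.slice_from_natCast]
    exact pvZip_eq_W _
  rw [hA, hB, pvW_pad _ (pvToChars_no_nul num)]
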